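-- pv_equiv track=rewrite | github.com/csebuetnlp/banglanmt | segmentation/segmenter.py | _is_not_opened
-- ===== SOURCE A (Python) =====
-- def _is_not_opened(span_str, brackets='()'):
--     """Check if the span starts with an unopened `bracket`."""
--     offset = span_str.rfind(brackets[1])
--     nesting = 0 if offset == -1 else 1
--
--     while offset != -1:
--         opener = span_str.rfind(brackets[0], 0, offset)
--         closer = span_str.rfind(brackets[1], 0, offset)
--
--         if opener == -1:
--             if closer == -1:
--                 offset = -1
--             else:
--                 offset = closer
--                 nesting += 1
--         elif closer == -1:
--             offset = opener
--             nesting -= 1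
--         elif closer < opener:
--             offset = opener
--             nesting -= 1
--         elif opener < closer:
--             offset = closer
--             nesting += 1
--         else:
--             msg = 'at offset={}: closer={}, opener={}'
--             raise RuntimeError(msg.format(offset, closer, opener))
--
--     return nesting > 0
-- ===== SOURCE B (Python) =====
-- def _is_not_opened(span_str, brackets='()'):
--     """Check if the span starts with an unopened `bracket`."""
--     last = span_str.rfind(brackets[1])
--     if last == -1:
--         return False
--     balance = 1
--     for ch in span_str[:last]:
--         if ch == brackets[1]:
--             balance += 1
--         elif ch == brackets[0]:
--             balance -= 1
--     return balance > 0
-- ===== Notes on version B (the rewrite author's own statement) =====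
-- stated objective: faster
-- what changed: A repeatedly restarts a backwards rfind for each bracket kind at every bracket it visits; B finds the last closer once and does a single left-to-right balance scan over the prefix before it.
import Mathlib
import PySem

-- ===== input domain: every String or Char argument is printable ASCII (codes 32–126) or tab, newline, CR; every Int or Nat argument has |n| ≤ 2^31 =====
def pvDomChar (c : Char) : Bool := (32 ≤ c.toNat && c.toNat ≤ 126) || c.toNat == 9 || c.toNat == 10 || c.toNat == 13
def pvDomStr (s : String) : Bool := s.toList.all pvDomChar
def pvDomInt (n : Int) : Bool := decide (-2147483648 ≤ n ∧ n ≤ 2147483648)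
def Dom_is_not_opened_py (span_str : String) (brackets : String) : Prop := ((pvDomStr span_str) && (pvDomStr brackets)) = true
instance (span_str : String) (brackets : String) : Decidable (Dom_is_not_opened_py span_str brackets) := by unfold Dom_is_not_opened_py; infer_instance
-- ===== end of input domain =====

-- B replaces A's repeated rfind walk (restarting a backwards search at every bracket) by one
-- linear left-to-right balance scan over the prefix ending at the last closer (objective: faster).

-- ===== PORT A =====

-- The while-loop of A: walk backwards from `offset`, jumping to the rightmost bracket
-- strictly before the current one, adjusting `nesting`.  `fuel` only makes the recursion
-- structural; it starts at |span| + 1, which exceeds the number of iterations.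
def isNotOpenedLoop (span : List Char) (b0 b1 : Char) (fuel : Nat) (offset : Int)
    (nesting : Int) : Int :=
  match fuel with
  | 0 => nesting  -- never reached: fuel > offset at every call
  | fuel + 1 =>
    if offset < 0 then nesting  -- while offset != -1 (offset is only ever ≥ -1)
    else
      let opener := PySem.Chars.rfindFrom span [b0] 0 (some offset)
      let closer := PySem.Chars.rfindFrom span [b1] 0 (some offset)
      if opener = -1 then
        if closer = -1 then nesting
        else isNotOpenedLoop span b0 b1 fuel closer (nesting + 1)
      else if closer = -1 then isNotOpenedLoop span b0 b1 fuel opener (nesting - 1)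
      else if closer < opener then isNotOpenedLoop span b0 b1 fuel opener (nesting - 1)
      else if opener < closer then isNotOpenedLoop span b0 b1 fuel closer (nesting + 1)
      else nesting  -- Python raises RuntimeError here (opener = closer); excluded by Pre_

def is_not_opened_py (span_str : String) (brackets : String) : Bool :=
  let s := span_str.toList
  let bl := brackets.toList
  -- brackets[1] / brackets[0]: Pre_ guarantees 2 ≤ |brackets| (else Python raises IndexError)
  let b0 := bl[0]!
  let b1 := bl[1]!
  let offset := PySem.Chars.rfind s [b1]
  let nesting : Int := if offset = -1 then 0 else 1
  decide (0 < isNotOpenedLoop s b0 b1 (s.length + 1) offset nesting)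

-- ===== PORT B =====
def is_not_opened_py_alt (span_str : String) (brackets : String) : Bool :=
  let s := span_str.toList
  let bl := brackets.toList
  let last := PySem.Chars.rfind s [bl[1]!]
  if last = -1 then false
  else
    let pre := PySem.List.slice s none (some last)   -- span_str[:last]
    let balance := pre.foldl
      (fun acc ch => if ch = bl[1]! then acc + 1 else if ch = bl[0]! then acc - 1 else acc)
      (1 : Int)
    decide (0 < balance)

-- ===== PRECONDITION & SPEC =====
-- Pre_ excludes exactly the inputs where the Python A raises: |brackets| < 2 (IndexError on
-- brackets[1]), and equal opener/closer brackets with the character occurring at least twice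
-- in span_str (A's RuntimeError branch `opener == closer`).
def Pre_is_not_opened_py (span_str : String) (brackets : String) : Prop :=
  2 ≤ brackets.toList.length ∧
  (brackets.toList[0]! = brackets.toList[1]! → span_str.toList.count brackets.toList[1]! ≤ 1)
instance (span_str : String) (brackets : String) : Decidable (Pre_is_not_opened_py span_str brackets) := by unfold Pre_is_not_opened_py; infer_instance

def pvWitness_is_not_opened_py : String × String := ("a) (b)", "()")

def Spec_is_not_opened_py (span_str : String) (brackets : String) (out : Bool) : Prop := out = is_not_opened_py_alt span_str brackets
instance (span_str : String) (brackets : String) (out : Bool) : Decidable (Spec_is_not_opened_py span_str brackets out) := by unfold Spec_is_not_opened_py; infer_instance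

-- ===== CLAIM (what is proved, stated in full; the proofs are below) =====
def Claim_equal_is_not_opened_py : Prop := ∀ (span_str : String) (brackets : String), Dom_is_not_opened_py span_str brackets → Pre_is_not_opened_py span_str brackets → Spec_is_not_opened_py span_str brackets (is_not_opened_py span_str brackets)

-- ===== LEMMAS AND PROOFS =====

-- An index holding `some c` is in range.
lemma pvIdxLt (t : List Char) (c : Char) (m : Nat) (h : t[m]? = some c) : m < t.length := by
  by_contra hge
  rw [List.getElem?_eq_none (by omega)] at h
  simp at h

-- `[c]` is a prefix of `t.drop m` exactly when `t[m]? = some c`.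
lemma pvPrefixIdx (t : List Char) (c : Char) (m : Nat) :
    [c].isPrefixOf (t.drop m) = true ↔ t[m]? = some c := by
  rw [← List.head?_drop]
  cases h : t.drop m with
  | nil => simp [List.isPrefixOf]
  | cons x xs =>
    constructor
    · intro hp
      have hcx : c = x := by simpa [List.isPrefixOf] using hp
      simp [hcx]
    · intro hh
      have hxc : x = c := by simpa using hh
      simp [List.isPrefixOf, hxc]

-- `PySem.Chars.rfind.go t [c] k` is the largest index `i ≤ k` with `t[i]? = some c`, else -1.
lemma pvGoSingleSpec (t : List Char) (c : Char) (k : Nat) :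
    (PySem.Chars.rfind.go t [c] k = -1 ∧ ∀ i : Nat, i ≤ k → t[i]? ≠ some c) ∨
    (∃ i : Nat, i ≤ k ∧ i < t.length ∧ PySem.Chars.rfind.go t [c] k = (i : Int) ∧
      t[i]? = some c ∧ ∀ j : Nat, i < j → j ≤ k → t[j]? ≠ some c) := by
  induction k with
  | zero =>
    by_cases h : t[0]? = some c
    · have hlt : 0 < t.length := pvIdxLt t c 0 h
      have hpre : [c].isPrefixOf t = true := by
        have := (pvPrefixIdx t c 0).mpr h
        simpa using this
      refine Or.inr ⟨0, le_refl _, hlt, by simp [PySem.Chars.rfind.go, hpre], h, by omega⟩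
    · have hpre : ¬ ([c].isPrefixOf t = true) := by
        intro hp
        exact h ((pvPrefixIdx t c 0).mp (by simpa using hp))
      refine Or.inl ⟨by simp [PySem.Chars.rfind.go, hpre], ?_⟩
      intro i hi
      interval_cases i
      exact h
  | succ k ih =>
    by_cases h : t[k + 1]? = some c
    · have hlt : k + 1 < t.length := pvIdxLt t c (k + 1) h
      have hpre := (pvPrefixIdx t c (k + 1)).mpr h
      refine Or.inr ⟨k + 1, le_refl _, hlt, by simp [PySem.Chars.rfind.go, hpre], h, by omega⟩
    · have hpre : ¬ ([c].isPrefixOf (t.drop (k + 1)) = true) := fun hp => h ((pvPrefixIdx t c (k + 1)).mp hp)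
      have hgo : PySem.Chars.rfind.go t [c] (k + 1) = PySem.Chars.rfind.go t [c] k := by
        simp [PySem.Chars.rfind.go, hpre]
      rcases ih with ⟨h1, h2⟩ | ⟨i, hik, hil, hgo', hi, hno⟩
      · refine Or.inl ⟨hgo ▸ h1, ?_⟩
        intro i hi
        rcases Nat.lt_or_ge i (k + 1) with hlt | hge
        · exact h2 i (by omega)
        · have : i = k + 1 := by omega
          subst this; exact h
      · refine Or.inr ⟨i, by omega, hil, hgo ▸ hgo', hi, ?_⟩
        intro j hij hjk
        rcases Nat.lt_or_ge j (k + 1) with hlt | hge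
        · exact hno j hij (by omega)
        · have : j = k + 1 := by omega
          subst this; exact h

-- `PySem.Chars.rfind t [c]` is the largest index of `c` in `t`, else -1.
lemma pvRfindSingleSpec (t : List Char) (c : Char) :
    (PySem.Chars.rfind t [c] = -1 ∧ ∀ i : Nat, t[i]? ≠ some c) ∨
    (∃ i : Nat, i < t.length ∧ PySem.Chars.rfind t [c] = (i : Int) ∧
      t[i]? = some c ∧ ∀ j : Nat, i < j → t[j]? ≠ some c) := by
  rcases pvGoSingleSpec t c t.length with ⟨h1, h2⟩ | ⟨i, _, hil, hgo, hi, hno⟩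
  · refine Or.inl ⟨h1, fun i => ?_⟩
    rcases Nat.lt_or_ge i t.length with hlt | hge
    · exact h2 i (by omega)
    · rw [List.getElem?_eq_none hge]; simp
  · refine Or.inr ⟨i, hil, hgo, hi, fun j hij => ?_⟩
    rcases Nat.lt_or_ge j t.length with hlt | hge
    · exact hno j hij (by omega)
    · rw [List.getElem?_eq_none hge]; simp

-- `span.rfind(c, 0, off)` for `0 ≤ off` is `rfind` on the prefix `take off`.
lemma pvRfindFromEq (s sub : List Char) (off : Int) (h0 : 0 ≤ off) :
    PySem.Chars.rfindFrom s sub 0 (some off) = PySem.Chars.rfind (s.take off.toNat) sub := by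
  unfold PySem.Chars.rfindFrom
  simp only [Int.toNat_zero, List.drop_zero]
  by_cases hn : (s.length : Int) < off
  · rw [if_pos hn, if_neg (lt_irrefl (0 : Int)),
      if_neg (show ¬ (s.length : Int) < (0 : Int) by omega)]
    rw [Int.toNat_natCast, List.take_length,
      List.take_of_length_le (show s.length ≤ off.toNat by omega)]
    rw [show List.drop (Int.toNat 0) s = s from rfl]
    split <;> omega
  · rw [if_neg hn, if_neg (show ¬ off < (0 : Int) by omega), if_neg (lt_irrefl (0 : Int)),
      if_neg (show ¬ off < (0 : Int) by omega)]
    rw [show List.drop (Int.toNat 0) (List.take off.toNat s) = List.take off.toNat s from rfl]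
    split <;> omega


-- No index of `t` holds `c` → count is 0.
lemma pvCountZero (t : List Char) (c : Char) (h : ∀ i : Nat, t[i]? ≠ some c) :
    t.count c = 0 := by
  rw [List.count_eq_zero]
  intro hmem
  rcases List.mem_iff_getElem?.mp hmem with ⟨i, hi⟩
  exact h i hi

-- No occurrence of `c` at positions [a, b) → counts of the prefixes agree.
lemma pvCountGap (t : List Char) (c : Char) (a b : Nat) (hab : a ≤ b)
    (h : ∀ k : Nat, a ≤ k → k < b → t[k]? ≠ some c) :
    (t.take b).count c = (t.take a).count c := by
  induction b with
  | zero => have : a = 0 := by omega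
            subst this; rfl
  | succ b ih =>
    rcases Nat.eq_or_lt_of_le hab with he | hlt
    · subst he; rfl
    · have hab' : a ≤ b := by omega
      rw [List.take_add_one, List.count_append]
      have hb := h b hab' (by omega)
      cases hv : t[b]? with
      | none => simpa [hv] using ih hab' (fun k hk hkb => h k hk (by omega))
      | some x =>
        have hxc : ¬ x == c := by
          simp only [beq_iff_eq]
          intro he; exact hb (hv ▸ he ▸ rfl)
        simp only [Option.toList_some, List.count_singleton, if_neg hxc, Nat.add_zero]
        exact ih hab' (fun k hk hkb => h k hk (by omega))

-- `c` at index i → the prefix through i has one more `c` than the prefix before i.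
lemma pvCountSucc (t : List Char) (c : Char) (i : Nat) (h : t[i]? = some c) :
    (t.take (i + 1)).count c = (t.take i).count c + 1 := by
  rw [List.take_add_one, List.count_append, h]
  simp

-- Last occurrence of `c` at i (nothing after) → count t = count (take i) + 1.
lemma pvCountLast (t : List Char) (c : Char) (i : Nat) (hil : i < t.length)
    (h : t[i]? = some c) (hno : ∀ j : Nat, i < j → t[j]? ≠ some c) :
    t.count c = (t.take i).count c + 1 := by
  have h1 : t.count c = (t.take t.length).count c := by rw [List.take_length]
  have h2 : (t.take t.length).count c = (t.take (i + 1)).count c :=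
    pvCountGap t c (i + 1) t.length (by omega) (fun k hk _ => hno k (by omega))
  rw [h1, h2, pvCountSucc t c i h]

-- Prefix-monotonicity of count.
lemma pvCountMono (t : List Char) (c : Char) (a b : Nat) (hab : a ≤ b) :
    (t.take a).count c ≤ (t.take b).count c := by
  have : t.take a <+: t.take b := by
    rw [show t.take a = (t.take b).take a by rw [List.take_take, Nat.min_eq_left hab]]
    exact List.take_prefix a (t.take b)
  exact List.IsPrefix.count_le c this

-- The backwards walk of A computes: nesting + (closers before offset) - (openers before offset).
lemma pvLoopEq (s : List Char) (b0 b1 : Char) (hne : b0 ≠ b1) (off : Nat)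
    (hoff : off ≤ s.length) : ∀ (fuel : Nat), off < fuel → ∀ nesting : Int,
    isNotOpenedLoop s b0 b1 fuel (off : Int) nesting =
      nesting + ((s.take off).count b1 : Int) - ((s.take off).count b0 : Int) := by
  induction off using Nat.strong_induction_on with
  | _ off ih =>
    intro fuel hfuel nesting
    obtain ⟨f, rfl⟩ : ∃ f, fuel = f + 1 := ⟨fuel - 1, by omega⟩
    rw [isNotOpenedLoop]
    rw [if_neg (by omega : ¬ ((off : Int) < 0))]
    simp only
    have htn : ((off : Int)).toNat = off := Int.toNat_natCast off
    have hlen : (s.take off).length = off := by simp [hoff]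
    have hop := pvRfindFromEq s [b0] (off : Int) (by omega)
    have hcl := pvRfindFromEq s [b1] (off : Int) (by omega)
    rw [htn] at hop hcl
    set t := s.take off with ht
    rcases pvRfindSingleSpec t b0 with ⟨hopv, hopno⟩ | ⟨i, hil, hopv, hiv, hino⟩ <;>
      rcases pvRfindSingleSpec t b1 with ⟨hclv, hclno⟩ | ⟨j, hjl, hclv, hjv, hjno⟩
    · -- no opener, no closer
      rw [hop, hopv, hcl, hclv]
      rw [pvCountZero t b0 hopno, pvCountZero t b1 hclno]
      simp
    · -- no opener, closer at j
      rw [hop, hopv, hcl, hclv]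
      have hjne : ((j : Int)) ≠ -1 := by omega
      simp only [if_neg hjne]
      have hjoff : j < off := by omega
      have hrec := ih j hjoff (by omega) f (by omega) (nesting + 1)
      rw [hclv] at hcl
      rw [hrec]
      have hc1 : t.count b1 = ((s.take j).count b1) + 1 := by
        have := pvCountLast t b1 j hjl hjv hjno
        rwa [show t.take j = s.take j by rw [ht, List.take_take, Nat.min_eq_left (by omega)]] at this
      have ht0 : t.count b0 = 0 := pvCountZero t b0 hopno
      have hc0 : (s.take j).count b0 = 0 := by
        have hm : (s.take j).count b0 ≤ (s.take off).count b0 := pvCountMono s b0 j off (by omega)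
        rw [← ht] at hm
        omega
      omega
    · -- opener at i, no closer
      rw [hop, hopv, hcl, hclv]
      have hine : ((i : Int)) ≠ -1 := by omega
      simp only [if_neg hine]
      have hioff : i < off := by omega
      have hrec := ih i hioff (by omega) f (by omega) (nesting - 1)
      rw [hrec]
      have hc0 : t.count b0 = ((s.take i).count b0) + 1 := by
        have := pvCountLast t b0 i hil hiv hino
        rwa [show t.take i = s.take i by rw [ht, List.take_take, Nat.min_eq_left (by omega)]] at this
      have ht1 : t.count b1 = 0 := pvCountZero t b1 hclno
      have hc1 : (s.take i).count b1 = 0 := by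
        have hm : (s.take i).count b1 ≤ (s.take off).count b1 := pvCountMono s b1 i off (by omega)
        rw [← ht] at hm
        omega
      omega
    · -- opener at i, closer at j
      rw [hop, hopv, hcl, hclv]
      have hine : ((i : Int)) ≠ -1 := by omega
      have hjne : ((j : Int)) ≠ -1 := by omega
      have hij : i ≠ j := by
        intro he
        rw [he, hjv] at hiv
        exact hne (Option.some.inj hiv).symm
      simp only [if_neg hine, if_neg hjne]
      rcases Nat.lt_or_ge j i with hji | hij' 
      · -- closer < opener: step to opener, nesting - 1
        rw [if_pos (by exact_mod_cast hji)]
        have hioff : i < off := by omega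
        have hrec := ih i hioff (by omega) f (by omega) (nesting - 1)
        rw [hrec]
        have hc0 : t.count b0 = ((s.take i).count b0) + 1 := by
          have := pvCountLast t b0 i hil hiv hino
          rwa [show t.take i = s.take i by rw [ht, List.take_take, Nat.min_eq_left (by omega)]] at this
        have hc1 : t.count b1 = (s.take i).count b1 := by
          have := pvCountGap t b1 i t.length (by omega)
            (fun k hk _ => hjno k (by omega))
          rw [List.take_length] at this
          rwa [show t.take i = s.take i by rw [ht, List.take_take, Nat.min_eq_left (by omega)]] at this
        omega
      · -- opener < closer: step to closer, nesting + 1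
        have hij2 : i < j := by omega
        rw [if_neg (by exact_mod_cast Nat.not_lt.mpr (by omega) : ¬ ((j : Int) < (i : Int)))]
        rw [if_pos (by exact_mod_cast hij2)]
        have hjoff : j < off := by omega
        have hrec := ih j hjoff (by omega) f (by omega) (nesting + 1)
        rw [hrec]
        have hc1 : t.count b1 = ((s.take j).count b1) + 1 := by
          have := pvCountLast t b1 j hjl hjv hjno
          rwa [show t.take j = s.take j by rw [ht, List.take_take, Nat.min_eq_left (by omega)]] at this
        have hc0 : t.count b0 = (s.take j).count b0 := by
          have := pvCountGap t b0 j t.length (by omega)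
            (fun k hk _ => hino k (by omega))
          rw [List.take_length] at this
          rwa [show t.take j = s.take j by rw [ht, List.take_take, Nat.min_eq_left (by omega)]] at this
        omega

-- B's single balance scan, distinct brackets: 1 + #closers - #openers.
lemma pvFoldNe (b0 b1 : Char) (hne : b0 ≠ b1) (l : List Char) : ∀ a : Int,
    l.foldl (fun acc ch => if ch = b1 then acc + 1 else if ch = b0 then acc - 1 else acc) a
      = a + (l.count b1 : Int) - (l.count b0 : Int) := by
  induction l with
  | nil => intro a; simp
  | cons x xs ih =>
    intro a
    by_cases h1 : x = b1
    · subst h1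
      simp only [List.foldl_cons, ih, List.count_cons, beq_iff_eq,
        if_neg (show ¬ x = b0 from fun h => hne (Eq.symm h))]
      push_cast
      ring
    · by_cases h0 : x = b0
      · subst h0
        simp only [List.foldl_cons, if_neg (show ¬ x = b1 from h1), ih,
          List.count_cons, beq_iff_eq]
        push_cast
        ring
      · simp only [List.foldl_cons, if_neg h1, if_neg h0, ih, List.count_cons, beq_iff_eq]
        push_cast
        ring

-- B's scan with equal brackets: the first test always wins, balance = 1 + #occurrences.
lemma pvFoldEqChar (b : Char) (l : List Char) : ∀ a : Int,
    l.foldl (fun acc ch => if ch = b then acc + 1 else if ch = b then acc - 1 else acc) a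
      = a + (l.count b : Int) := by
  induction l with
  | nil => intro a; simp
  | cons x xs ih =>
    intro a
    by_cases h1 : x = b
    · subst h1
      simp only [List.foldl_cons, ih, List.count_cons, beq_iff_eq]
      push_cast
      ring
    · simp only [List.foldl_cons, if_neg h1, ih, List.count_cons, beq_iff_eq]
      push_cast
      ring

-- ===== VERDICT (by name: the statement is the Claim_ definition above) =====
theorem is_not_opened_py_spec : Claim_equal_is_not_opened_py := by
  intro span_str brackets _hdom hpre
  unfold Spec_is_not_opened_py
  obtain ⟨hlen, heqc⟩ := hpre
  unfold is_not_opened_py is_not_opened_py_alt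
  simp only
  set s := span_str.toList with hs
  set bl := brackets.toList with hbl
  set b0 := bl[0]! with hb0
  set b1 := bl[1]! with hb1
  rcases pvRfindSingleSpec s b1 with ⟨hrv, hrno⟩ | ⟨i, hil, hrv, hiv, hino⟩
  · -- no closer at all: both sides are false
    rw [hrv]
    simp [isNotOpenedLoop]
  · -- last closer at index i
    have hine : ((i : Int)) ≠ -1 := by omega
    rw [hrv]
    simp only [if_neg hine]
    have hsl : PySem.List.slice s none (some ((i : Int))) = s.take i := by
      rw [PySem.List.slice_to s (by omega)]
      simp
    rw [hsl]
    by_cases hne : b0 = b1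
    · -- equal brackets: Pre_ gives at most one occurrence
      have hcnt : s.count b1 ≤ 1 := heqc (hne)
      have hci : (s.take i).count b1 = 0 := by
        have := pvCountLast s b1 i hil hiv hino
        omega
      have hci0 : (s.take i).count b0 = 0 := by rw [hne]; exact hci
      -- A's loop at offset i: both inner searches come up empty, nesting stays 1
      have hnone : PySem.Chars.rfind (s.take i) [b1] = -1 := by
        rcases pvRfindSingleSpec (s.take i) b1 with ⟨h1, _⟩ | ⟨j, hjl, hr, hjv, _⟩
        · exact h1
        · exact absurd (List.mem_iff_getElem?.mpr ⟨j, hjv⟩) (List.count_eq_zero.mp hci)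
      have hloop : isNotOpenedLoop s b0 b1 (s.length + 1) (i : Int) 1 = 1 := by
        rw [isNotOpenedLoop, if_neg (by omega : ¬ ((i : Int) < 0))]
        simp only
        rw [hne]
        rw [pvRfindFromEq s [b1] (i : Int) (by omega),
          show ((i : Int)).toNat = i from Int.toNat_natCast i, hnone]
        simp
      rw [hloop]
      rw [hne, pvFoldEqChar b1 (s.take i) 1, hci]
      norm_num
    · -- distinct brackets: both sides are 1 + closers - openers on the prefix
      rw [pvLoopEq s b0 b1 hne i (by omega) (s.length + 1) (by omega) 1]
      rw [pvFoldNe b0 b1 hne (s.take i) 1]
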